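-- pv_equiv track=rewrite | github.com/kaushalkahapola/retrofit-java | agents-backend/evaluate/full_run/evaluate_full_workflow.py | _build_touched_test_state_markdown
-- ===== SOURCE A (Python) =====
-- from typing import Any
--
-- def _build_touched_test_state_markdown(
--     touched_classes: list[str],
--     baseline_result: dict[str, Any],
--     patched_result: dict[str, Any],
-- ) -> str:
--     if not touched_classes:
--         return "- Touched tests (from patch): []\n"
--
--     baseline_state = (baseline_result or {}).get("test_state") or {}
--     patched_state = (patched_result or {}).get("test_state") or {}
--
--     baseline_cases = baseline_state.get("test_cases") or {}
--     patched_cases = patched_state.get("test_cases") or {}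
--     baseline_classes = baseline_state.get("classes") or {}
--     patched_classes = patched_state.get("classes") or {}
--     patched_missing = not patched_cases and not patched_classes
--
--     lines = [f"- Touched tests (from patch): {touched_classes}"]
--     for cls in touched_classes:
--         class_case_keys = sorted(
--             {
--                 key
--                 for key in set(baseline_cases.keys()) | set(patched_cases.keys())
--                 if key.startswith(f"{cls}#")
--             }
--         )
--         if class_case_keys:
--             for key in class_case_keys:
--                 old_status = baseline_cases.get(key, "absent")
--                 new_status = patched_cases.get(
--                     key, "unknown" if patched_missing else "absent"
--                 )
--                 lines.append(f"  - {key}: baseline={old_status}, patched={new_status}")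
--         else:
--             old_status = baseline_classes.get(cls, "absent")
--             new_status = patched_classes.get(
--                 cls, "unknown" if patched_missing else "absent"
--             )
--             lines.append(f"  - {cls}: baseline={old_status}, patched={new_status}")
--
--     return "\n".join(lines) + "\n"
-- ===== SOURCE B (Python) =====
-- def _build_touched_test_state_markdown(
--     touched_classes,
--     baseline_result,
--     patched_result,
-- ):
--     if not touched_classes:
--         return "- Touched tests (from patch): []\n"
--
--     baseline_state = (baseline_result or {}).get("test_state") or {}
--     patched_state = (patched_result or {}).get("test_state") or {}
--
--     baseline_cases = baseline_state.get("test_cases") or {}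
--     patched_cases = patched_state.get("test_cases") or {}
--     baseline_classes = baseline_state.get("classes") or {}
--     patched_classes = patched_state.get("classes") or {}
--     default_new = "unknown" if not patched_cases and not patched_classes else "absent"
--
--     # one pass over the union of case keys: file each key under every
--     # class prefix that precedes a '#', so the per-class scan disappears
--     groups = {}
--     for key in dict.fromkeys(list(baseline_cases) + list(patched_cases)):
--         for i, ch in enumerate(key):
--             if ch == "#":
--                 groups.setdefault(key[:i], []).append(key)
--
--     def line(name, old, new):
--         return f"  - {name}: baseline={old}, patched={new}"
--
--     def rows(cls):
--         keys = groups.get(cls)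
--         if keys:
--             return [
--                 line(k, baseline_cases.get(k, "absent"), patched_cases.get(k, default_new))
--                 for k in sorted(keys)
--             ]
--         return [
--             line(cls, baseline_classes.get(cls, "absent"), patched_classes.get(cls, default_new))
--         ]
--
--     header = f"- Touched tests (from patch): {touched_classes}"
--     return "\n".join([header] + [r for cls in touched_classes for r in rows(cls)]) + "\n"
-- ===== Notes on version B (the rewrite author's own statement) =====
-- stated objective: alternative
-- what changed: Instead of rebuilding the union of baseline/patched case keys and filtering+sorting it once per touched class, B makes one grouping pass over the deduplicated union that files each key under every class prefix preceding a '#', then each class just looks up its bucket and sorts it.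
import Mathlib
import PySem

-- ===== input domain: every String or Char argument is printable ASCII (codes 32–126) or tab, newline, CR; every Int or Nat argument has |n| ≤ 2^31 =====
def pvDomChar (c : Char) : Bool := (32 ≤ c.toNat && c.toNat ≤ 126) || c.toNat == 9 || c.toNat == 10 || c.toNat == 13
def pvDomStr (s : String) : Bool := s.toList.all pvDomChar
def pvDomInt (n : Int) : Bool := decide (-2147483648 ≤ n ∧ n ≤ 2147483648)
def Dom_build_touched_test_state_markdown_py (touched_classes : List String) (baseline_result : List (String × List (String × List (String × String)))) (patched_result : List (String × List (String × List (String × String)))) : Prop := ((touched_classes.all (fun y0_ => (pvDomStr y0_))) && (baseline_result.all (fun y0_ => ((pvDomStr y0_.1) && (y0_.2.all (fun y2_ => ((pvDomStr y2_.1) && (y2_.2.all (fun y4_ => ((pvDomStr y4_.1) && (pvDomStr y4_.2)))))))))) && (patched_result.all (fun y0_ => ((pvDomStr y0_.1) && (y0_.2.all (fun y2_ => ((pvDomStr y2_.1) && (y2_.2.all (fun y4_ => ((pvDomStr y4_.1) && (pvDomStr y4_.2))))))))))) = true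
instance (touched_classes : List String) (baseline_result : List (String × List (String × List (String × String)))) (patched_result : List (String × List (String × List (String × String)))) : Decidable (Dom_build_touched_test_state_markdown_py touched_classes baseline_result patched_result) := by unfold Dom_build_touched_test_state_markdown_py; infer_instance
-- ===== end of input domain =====

-- B replaces A's per-class set-union + filter + sort with one grouping pass over the union of case
-- keys (bucket per '#'-prefix) and a per-bucket sort: an alternative algorithm for the same output.

-- ===== PORT A =====
-- shared f-string helper: Python repr() of a str / list of str (exact on the printable-ASCII + tab/newline/CR domain)
def pyReprChars (q : Char) (cs : List Char) : List Char :=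
  cs.flatMap (fun c =>
    if c = '\\' then ['\\', '\\']
    else if c = q then ['\\', q]
    else if c = '\t' then ['\\', 't']
    else if c = '\n' then ['\\', 'n']
    else if c = '\r' then ['\\', 'r']
    else [c])

def pyReprStr (s : String) : String :=
  let cs := s.toList
  let q : Char := if '\'' ∈ cs ∧ ¬ '"' ∈ cs then '"' else '\''
  String.ofList (q :: (pyReprChars q cs ++ [q]))

def pyReprStrList (xs : List String) : String :=
  "[" ++ PySem.Str.join ", " (xs.map pyReprStr) ++ "]"

def build_touched_test_state_markdown_py (touched_classes : List String) (baseline_result : List (String × List (String × List (String × String)))) (patched_result : List (String × List (String × List (String × String)))) : String :=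
  if touched_classes = [] then "- Touched tests (from patch): []\n" else
  -- '(x or {}).get("test_state") or {}' : a missing key and an empty dict both yield {}
  let baseline_state := (PySem.Dict.mk baseline_result).getD "test_state" []
  let patched_state := (PySem.Dict.mk patched_result).getD "test_state" []
  let baseline_cases := (PySem.Dict.mk baseline_state).getD "test_cases" []
  let patched_cases := (PySem.Dict.mk patched_state).getD "test_cases" []
  let baseline_classes := (PySem.Dict.mk baseline_state).getD "classes" []
  let patched_classes := (PySem.Dict.mk patched_state).getD "classes" []
  let patchedMissing : Bool := patched_cases.isEmpty && patched_classes.isEmpty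
  let lines := touched_classes.foldl (fun lines cls =>
    let class_case_keys := PySem.List.sorted
      (PySem.Set.ofList ((PySem.Set.union (PySem.Set.ofList ((PySem.Dict.mk baseline_cases).keys))
          ((PySem.Dict.mk patched_cases).keys)).filter
        (fun key => PySem.Str.startswith key (cls ++ "#")))) (fun k => k)
    if class_case_keys ≠ [] then
      class_case_keys.foldl (fun ls key =>
        let old_status := (PySem.Dict.mk baseline_cases).getD key "absent"
        let new_status := (PySem.Dict.mk patched_cases).getD key
          (if patchedMissing then "unknown" else "absent")
        ls ++ ["  - " ++ key ++ ": baseline=" ++ old_status ++ ", patched=" ++ new_status]) lines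
    else
      let old_status := (PySem.Dict.mk baseline_classes).getD cls "absent"
      let new_status := (PySem.Dict.mk patched_classes).getD cls
        (if patchedMissing then "unknown" else "absent")
      lines ++ ["  - " ++ cls ++ ": baseline=" ++ old_status ++ ", patched=" ++ new_status])
    ["- Touched tests (from patch): " ++ pyReprStrList touched_classes]
  PySem.Str.join "\n" lines ++ "\n"

-- ===== PORT B =====
-- helper _state(result): the two sections of a result's test_state
def btsState (result : List (String × List (String × List (String × String)))) : List (String × String) × List (String × String) :=
  let state := (PySem.Dict.mk result).getD "test_state" []
  ((PySem.Dict.mk state).getD "test_cases" [], (PySem.Dict.mk state).getD "classes" [])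

def btsLine (name old new : String) : String :=
  "  - " ++ name ++ ": baseline=" ++ old ++ ", patched=" ++ new

-- one key of the grouping pass: walk the key's characters with the running prefix,
-- appending the key to the bucket of every prefix that precedes a '#'
def btsFile (g : PySem.Dict (List Char) (List String)) (key : String) : PySem.Dict (List Char) (List String) :=
  (key.toList.foldl (fun (st : List Char × PySem.Dict (List Char) (List String)) ch =>
    (st.1 ++ [ch], if ch = '#' then st.2.modify st.1 [] (· ++ [key]) else st.2)) ([], g)).2

def build_touched_test_state_markdown_py_alt (touched_classes : List String) (baseline_result : List (String × List (String × List (String × String)))) (patched_result : List (String × List (String × List (String × String)))) : String :=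
  if touched_classes = [] then "- Touched tests (from patch): []\n" else
  let bsec := btsState baseline_result
  let psec := btsState patched_result
  let defaultNew : String := if psec.1.isEmpty && psec.2.isEmpty then "unknown" else "absent"
  let groups := (PySem.List.dedup ((PySem.Dict.mk bsec.1).keys ++ (PySem.Dict.mk psec.1).keys)).foldl
    btsFile PySem.Dict.empty
  let rows := fun (cls : String) =>
    let keys := groups.getD cls.toList []
    if keys ≠ [] then
      (PySem.List.sorted keys (fun k => k)).map (fun k =>
        btsLine k ((PySem.Dict.mk bsec.1).getD k "absent") ((PySem.Dict.mk psec.1).getD k defaultNew))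
    else
      [btsLine cls ((PySem.Dict.mk bsec.2).getD cls "absent") ((PySem.Dict.mk psec.2).getD cls defaultNew)]
  PySem.Str.join "\n" (["- Touched tests (from patch): " ++ pyReprStrList touched_classes]
    ++ touched_classes.flatMap rows) ++ "\n"

-- ===== PRECONDITION & SPEC =====
def Spec_build_touched_test_state_markdown_py (touched_classes : List String) (baseline_result : List (String × List (String × List (String × String)))) (patched_result : List (String × List (String × List (String × String)))) (out : String) : Prop := out = build_touched_test_state_markdown_py_alt touched_classes baseline_result patched_result
instance (touched_classes : List String) (baseline_result : List (String × List (String × List (String × String)))) (patched_result : List (String × List (String × List (String × String)))) (out : String) : Decidable (Spec_build_touched_test_state_markdown_py touched_classes baseline_result patched_result out) := by unfold Spec_build_touched_test_state_markdown_py; infer_instance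

-- ===== CLAIM (what is proved, stated in full; the proofs are below) =====
def Claim_equal_build_touched_test_state_markdown_py : Prop := ∀ (touched_classes : List String) (baseline_result : List (String × List (String × List (String × String)))) (patched_result : List (String × List (String × List (String × String)))), Dom_build_touched_test_state_markdown_py touched_classes baseline_result patched_result → Spec_build_touched_test_state_markdown_py touched_classes baseline_result patched_result (build_touched_test_state_markdown_py touched_classes baseline_result patched_result)

-- ===== LEMMAS AND PROOFS =====
-- 'key still files under class c': the running prefix p extends to c, and right after that extension the rest cs carries a '#'
def hpB (c p cs : List Char) : Bool := decide (p <+: c) && decide ((c.drop p.length ++ ['#']) <+: cs)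

lemma hp_nil (c p : List Char) : hpB c p [] = false := by
  simp [hpB]

lemma hp_top (c cs : List Char) : hpB c [] cs = decide ((c ++ ['#']) <+: cs) := by
  simp [hpB]

lemma hp_head (c cs : List Char) : hpB c c ('#' :: cs) = true := by
  simp [hpB, List.drop_length, List.cons_prefix_cons]

lemma hp_long (c p : List Char) (ch : Char) (cs : List Char) (h : p = c) : hpB c (p ++ [ch]) cs = false := by
  have hlen : ¬ (p ++ [ch] <+: c) := by
    subst h
    intro hpre
    have := hpre.length_le
    simp at this
  simp [hpB, hlen]

lemma hp_next (c p : List Char) (ch : Char) (cs : List Char) (h : ¬ (p = c ∧ ch = '#')) :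
    hpB c p (ch :: cs) = hpB c (p ++ [ch]) cs := by
  by_cases hpc : p <+: c
  · obtain ⟨t, rfl⟩ := hpc
    cases t with
    | nil =>
      have hch : ch ≠ '#' := fun hc => h ⟨by simp, hc⟩
      rw [hp_long _ _ _ _ (by simp)]
      simp [hpB, List.drop_length, List.cons_prefix_cons, Ne.symm hch]
    | cons a t' =>
      by_cases hca : ch = a
      · subst hca
        have e1 : (p ++ ch :: t').drop p.length = ch :: t' := List.drop_left
        have e2 : (p ++ ch :: t').drop (p ++ [ch]).length = t' := by
          rw [show p ++ ch :: t' = (p ++ [ch]) ++ t' by simp]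
          exact List.drop_left
        simp only [hpB, e1, e2]
        simp [List.cons_prefix_cons, List.prefix_append_right_inj]
      · have e1 : (p ++ a :: t').drop p.length = a :: t' := List.drop_left
        have hL : ¬ ((a :: t' ++ ['#']) <+: ch :: cs) := by
          rw [List.cons_append, List.cons_prefix_cons]
          rintro ⟨hae, -⟩
          exact hca hae.symm
        have hR : ¬ (p ++ [ch] <+: p ++ a :: t') := by
          rw [List.prefix_append_right_inj, List.cons_prefix_cons]
          rintro ⟨hae, -⟩
          exact hca hae
        simp [hpB, e1, hR]
        intro hae
        exact absurd hae.symm hca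
  · have h2 : ¬ (p ++ [ch] <+: c) := fun hh => hpc ((List.prefix_append p [ch]).trans hh)
    simp [hpB, hpc, h2]

lemma btsFile_inner (c : List Char) (key : String) : ∀ (cs p : List Char) (g : PySem.Dict (List Char) (List String)),
    ((cs.foldl (fun (st : List Char × PySem.Dict (List Char) (List String)) ch =>
        (st.1 ++ [ch], if ch = '#' then st.2.modify st.1 [] (· ++ [key]) else st.2)) (p, g)).2).getD c []
      = g.getD c [] ++ (if hpB c p cs then [key] else []) := by
  intro cs
  induction cs with
  | nil => intro p g; simp [hp_nil]
  | cons ch cs ih =>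
    intro p g
    rw [List.foldl_cons]
    dsimp only
    rw [ih]
    by_cases h1 : p = c ∧ ch = '#'
    · obtain ⟨rfl, rfl⟩ := h1
      rw [hp_head, hp_long _ _ _ _ rfl]
      simp [PySem.Dict.getD_modify_self]
    · rw [hp_next _ _ _ _ h1]
      congr 1
      by_cases h2 : ch = '#'
      · have hpc : c ≠ p := fun hh => h1 ⟨hh.symm, h2⟩
        simp only [h2, if_pos]
        rw [PySem.Dict.getD_modify]
        simp [hpc]
      · simp [h2]

lemma btsFile_getD (g : PySem.Dict (List Char) (List String)) (key : String) (c : List Char) :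
    (btsFile g key).getD c [] = g.getD c [] ++ (if hpB c [] key.toList then [key] else []) := by
  unfold btsFile
  exact btsFile_inner c key key.toList [] g

lemma groups_getD (c : List Char) : ∀ (U : List String) (g : PySem.Dict (List Char) (List String)),
    ((U.foldl btsFile g).getD c []) = g.getD c [] ++ U.filter (fun k => hpB c [] k.toList) := by
  intro U
  induction U with
  | nil => intro g; simp
  | cons k U ih =>
    intro g
    simp only [List.foldl_cons, List.filter_cons, ih, btsFile_getD]
    by_cases h : hpB c [] k.toList = true <;> simp [h]

lemma startswith_hp (cls : String) : (fun key => PySem.Str.startswith key (cls ++ "#")) = (fun k : String => hpB cls.toList [] k.toList) := by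
  funext k
  rw [PySem.Str.startswith_eq, hp_top]
  have ht : (cls ++ "#").toList = cls.toList ++ ['#'] := by simp [String.toList_append]
  rw [ht]
  by_cases hpre : cls.toList ++ ['#'] <+: k.toList
  · simp [hpre, (PySem.Chars.startswith_iff k.toList (cls.toList ++ ['#'])).2 hpre]
  · simp only [hpre, decide_false]
    exact Bool.eq_false_iff.mpr (fun hc => hpre ((PySem.Chars.startswith_iff _ _).1 hc))

lemma ofList_self {xs : List String} (h : xs.Nodup) : PySem.Set.ofList xs = xs := by
  rw [PySem.Set.ofList_eq_foldl]
  have := PySem.Set.update_eq_append_of_disjoint ([] : PySem.Set String) xs h (by simp)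
  simpa [PySem.Set.update] using this

lemma union_eq_dedup (a b : List String) : (PySem.Set.union (PySem.Set.ofList a) b : PySem.Set String) = PySem.List.dedup (a ++ b) := by
  simp [PySem.Set.union, PySem.Set.update, PySem.List.dedup_eq_ofList, PySem.Set.ofList_eq_foldl, List.foldl_append]

lemma getD_empty (c : List Char) : (PySem.Dict.empty : PySem.Dict (List Char) (List String)).getD c [] = [] := by
  simp [PySem.Dict.getD, PySem.Dict.get?, PySem.Dict.empty]

lemma foldl_blocks (f : List String → String → List String) (g : String → List String)
    (h : ∀ ls cls, f ls cls = ls ++ g cls) (l : List String) (init : List String) :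
    l.foldl f init = init ++ l.flatMap g := by
  have hf : f = fun ls cls => ls ++ g cls := by funext ls cls; exact h ls cls
  rw [hf, PySem.List.foldl_append_eq_flatMap]

lemma block_eq (bcases pcases bclasses pclasses : List (String × String)) (ls : List String) (cls : String) :
    (let class_case_keys := PySem.List.sorted (PySem.Set.ofList
        ((PySem.Set.union (PySem.Set.ofList ((PySem.Dict.mk bcases).keys)) ((PySem.Dict.mk pcases).keys)).filter
          (fun key => PySem.Str.startswith key (cls ++ "#")))) (fun k => k)
     if class_case_keys ≠ [] then
       class_case_keys.foldl (fun ls key =>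
         ls ++ ["  - " ++ key ++ ": baseline=" ++ ((PySem.Dict.mk bcases).getD key "absent") ++ ", patched=" ++
           ((PySem.Dict.mk pcases).getD key (if pcases.isEmpty && pclasses.isEmpty then "unknown" else "absent"))]) ls
     else
       ls ++ ["  - " ++ cls ++ ": baseline=" ++ ((PySem.Dict.mk bclasses).getD cls "absent") ++ ", patched=" ++
         ((PySem.Dict.mk pclasses).getD cls (if pcases.isEmpty && pclasses.isEmpty then "unknown" else "absent"))])
    = ls ++
      (let keys := ((PySem.List.dedup ((PySem.Dict.mk bcases).keys ++ (PySem.Dict.mk pcases).keys)).foldl btsFile PySem.Dict.empty).getD cls.toList []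
       if keys ≠ [] then
         (PySem.List.sorted keys (fun k => k)).map (fun k =>
           btsLine k ((PySem.Dict.mk bcases).getD k "absent") ((PySem.Dict.mk pcases).getD k (if pcases.isEmpty && pclasses.isEmpty then "unknown" else "absent")))
       else
         [btsLine cls ((PySem.Dict.mk bclasses).getD cls "absent") ((PySem.Dict.mk pclasses).getD cls (if pcases.isEmpty && pclasses.isEmpty then "unknown" else "absent"))]) := by
  dsimp only
  rw [startswith_hp, union_eq_dedup, groups_getD, getD_empty, List.nil_append]
  rw [ofList_self (List.Nodup.filter _ (by rw [PySem.List.dedup_eq_ofList]; exact PySem.Set.nodup_ofList _))]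
  by_cases hne : (PySem.List.dedup ((PySem.Dict.mk bcases).keys ++ (PySem.Dict.mk pcases).keys)).filter (fun k => hpB cls.toList [] k.toList) = []
  · rw [hne]
    simp [btsLine, PySem.List.sorted_eq_nil_iff]
  · rw [if_pos (by rw [Ne, PySem.List.sorted_eq_nil_iff]; exact hne), if_pos hne]
    rw [PySem.List.foldl_append_singleton_eq_map]
    simp [btsLine]

lemma main_eq (touched_classes : List String) (baseline_result : List (String × List (String × List (String × String)))) (patched_result : List (String × List (String × List (String × String)))) :
    build_touched_test_state_markdown_py touched_classes baseline_result patched_result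
      = build_touched_test_state_markdown_py_alt touched_classes baseline_result patched_result := by
  by_cases htc : touched_classes = []
  · simp [build_touched_test_state_markdown_py, build_touched_test_state_markdown_py_alt, htc]
  · unfold build_touched_test_state_markdown_py build_touched_test_state_markdown_py_alt btsState
    rw [if_neg htc, if_neg htc]
    exact congrArg (fun L => PySem.Str.join "\n" L ++ "\n")
      (foldl_blocks _ _ (fun ls cls => block_eq _ _ _ _ ls cls) _ _)

-- ===== VERDICT (by name: the statement is the Claim_ definition above) =====
theorem build_touched_test_state_markdown_py_spec : Claim_equal_build_touched_test_state_markdown_py := by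
  intro tc bs ps _
  unfold Spec_build_touched_test_state_markdown_py
  exact main_eq tc bs ps
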